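-- pv_equiv track=rewrite | github.com/leoybkim/AdventOfCode | 2025/day06/solution.py | part_one
-- ===== SOURCE A (Python) =====
-- import math
--
-- def parsed_data(data: str) -> tuple[list, str]:
--     homework = data.splitlines()
--     variables = homework[:len(homework) - 1]
--     operators = homework[-1]
--     return variables, operators
--
-- def part_one(data: str) -> int:
--     variables, operators = parsed_data(data)
--     variables = [list(map(int, temp.split())) for temp in variables]
--     pivoted = list(zip(*variables))
--     answers = []
--     for i, ops in enumerate(operators.split()):
--         if ops == "*":
--             answers.append(math.prod(list(map(int, pivoted[i]))))
--         elif ops == "+":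
--             answers.append(sum(list(map(int, pivoted[i]))))
--
--     return sum(answers)
-- ===== SOURCE B (Python) =====
-- def part_one(data: str) -> int:
--     lines = data.splitlines()
--     ops = lines[-1].split()
--     # one accumulator per operator column: product starts at 1, sum at 0
--     accs = [1 if op == "*" else 0 for op in ops]
--     for line in lines[:-1]:
--         vals = line.split()
--         accs = [acc * int(vals[i]) if op == "*" else
--                 acc + int(vals[i]) if op == "+" else acc
--                 for i, (op, acc) in enumerate(zip(ops, accs))]
--     return sum(acc for op, acc in zip(ops, accs) if op == "*" or op == "+")
-- ===== Notes on version B (the rewrite author's own statement) =====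
-- stated objective: alternative
-- what changed: Replaces the transpose (zip(*rows)) plus per-column reduce with a single row-major pass maintaining one running accumulator per operator column (init 1 for '*', 0 for '+'), summing the accumulators at the end.
import Mathlib
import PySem

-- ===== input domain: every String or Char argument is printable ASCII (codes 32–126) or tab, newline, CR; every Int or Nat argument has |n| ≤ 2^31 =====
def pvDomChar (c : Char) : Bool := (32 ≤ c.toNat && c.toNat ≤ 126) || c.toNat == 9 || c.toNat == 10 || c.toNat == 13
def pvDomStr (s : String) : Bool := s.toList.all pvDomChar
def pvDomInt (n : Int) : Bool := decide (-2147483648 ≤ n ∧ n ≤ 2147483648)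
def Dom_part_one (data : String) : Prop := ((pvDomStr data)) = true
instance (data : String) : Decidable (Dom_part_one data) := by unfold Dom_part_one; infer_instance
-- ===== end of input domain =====

-- B replaces A's transpose (zip(*rows)) + per-column reduce with a single row-major pass
-- over per-operator-column accumulators; same cost, different traversal and state.

-- ===== PORT A =====
-- math.prod on a list of ints
def pyProdInt (xs : List Int) : Int := xs.foldl (· * ·) 1

-- zip(*rows): hand-written (PySem's zip is binary); exact: repeatedly take all heads
-- while every row is nonempty, truncating at the shortest row.
def pyZipStar : List (List Int) → List (List Int)
  | [] => []
  | r :: rs =>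
    if h : r ≠ [] ∧ rs.all (fun t => !t.isEmpty) then
      (r.headD 0 :: rs.map (fun t => t.headD 0)) :: pyZipStar (r.tail :: rs.map (fun t => t.tail))
    else []
termination_by rows => (rows.headD []).length
decreasing_by
  simp only [List.headD_cons]
  cases r with
  | nil => exact absurd rfl h.1
  | cons a t => simp

-- parsed_data: homework[:len-1] and homework[-1] (IndexError on empty data excluded by Pre_)
def parsed_data (data : String) : List String × String :=
  let homework := PySem.Str.splitlines data
  (PySem.List.slice homework none (some ((homework.length : Int) - 1)),
   (PySem.List.pyGet? homework (-1)).getD "")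

-- literal port of A; list(map(int, pivoted[i])) is the identity on a list of ints and is ported as such
def part_one (data : String) : Int :=
  let vo := parsed_data data
  let vars : List (List Int) :=
    vo.1.map (fun temp => (PySem.Str.split₀ temp).map (fun s => (PySem.Int.ofStr? s).getD 0))
  let pivoted := pyZipStar vars
  let answers : List Int :=
    (PySem.List.enumerate (PySem.Str.split₀ vo.2) 0).foldl
      (fun answers iops =>
        if iops.2 = "*" then answers ++ [pyProdInt ((PySem.List.pyGet? pivoted iops.1).getD [])]
        else if iops.2 = "+" then answers ++ [((PySem.List.pyGet? pivoted iops.1).getD []).sum]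
        else answers) []
  answers.sum

-- ===== PORT B =====
-- int(vals[i])  (outside Pre_ Python raises; the getD defaults are never reached inside Pre_)
def bIntAt (line : String) (i : Int) : Int :=
  (PySem.Int.ofStr? ((PySem.List.pyGet? (PySem.Str.split₀ line) i).getD "")).getD 0

-- one row of B's comprehension: update every accumulator from this line
def bStep (ops : List String) (accs : List Int) (line : String) : List Int :=
  (PySem.List.enumerate (ops.zip accs) 0).map (fun p =>
    if p.2.1 = "*" then p.2.2 * bIntAt line p.1
    else if p.2.1 = "+" then p.2.2 + bIntAt line p.1
    else p.2.2)

def part_one_alt (data : String) : Int :=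
  let lines := PySem.Str.splitlines data
  let ops := PySem.Str.split₀ ((PySem.List.pyGet? lines (-1)).getD "")
  let accs0 : List Int := ops.map (fun op => if op = "*" then 1 else 0)
  let accs := (PySem.List.slice lines none (some (-1))).foldl (bStep ops) accs0
  (ops.zip accs).foldl (fun s p => if p.1 = "*" ∨ p.1 = "+" then s + p.2 else s) 0

-- ===== PRECONDITION & SPEC =====
-- Pre_ excludes exactly the inputs where A raises: empty input (IndexError on homework[-1]),
-- a non-integer token in a data row (ValueError from int), and a '*'/'+' operator whose column
-- index reaches past the shortest data row or for which there are no data rows (IndexError on pivoted[i]).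
def Pre_part_one (data : String) : Prop :=
  let lines := PySem.Str.splitlines data
  lines ≠ [] ∧
  (∀ line ∈ lines.dropLast, ∀ tok ∈ PySem.Str.split₀ line, (PySem.Int.ofStr? tok).isSome = true) ∧
  (∀ p ∈ PySem.List.enumerate (PySem.Str.split₀ (lines.getLast?.getD "")) 0,
     p.2 = "*" ∨ p.2 = "+" →
       lines.dropLast ≠ [] ∧
       ∀ line ∈ lines.dropLast, p.1 < ((PySem.Str.split₀ line).length : Int))
instance (data : String) : Decidable (Pre_part_one data) := by unfold Pre_part_one; infer_instance

def pvWitness_part_one : String := "1 2\n3 4\n+ *"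

def Spec_part_one (data : String) (out : Int) : Prop := out = part_one_alt data
instance (data : String) (out : Int) : Decidable (Spec_part_one data out) := by unfold Spec_part_one; infer_instance

-- ===== CLAIM (what is proved, stated in full; the proofs are below) =====
def Claim_equal_part_one : Prop := ∀ (data : String), Dom_part_one data → Pre_part_one data → Spec_part_one data (part_one data)

-- ===== LEMMAS AND PROOFS =====

-- a data row parsed to ints (shared shape in the proofs)
def prow (line : String) : List Int :=
  (PySem.Str.split₀ line).map (fun s => (PySem.Int.ofStr? s).getD 0)

theorem slice_len_sub_one {α : Type} (xs : List α) :
    PySem.List.slice xs none (some ((xs.length : Int) - 1)) = xs.dropLast := by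
  cases xs with
  | nil => simp [PySem.List.slice_to_neg_one]
  | cons a t =>
    have : ((a :: t).length : Int) - 1 = ((t.length : Nat) : Int) := by simp
    rw [this, PySem.List.slice_to_natCast]
    simp [List.dropLast_eq_take]

theorem headD_eq_getD_zero (t : List Int) : t.headD 0 = t.getD 0 0 := by
  cases t <;> simp [List.getD]

theorem tail_getD (t : List Int) (n : Nat) (h : n + 1 < t.length) :
    t.tail.getD n 0 = t.getD (n + 1) 0 := by
  cases t with
  | nil => simp at h
  | cons a u => simp [List.getD]

theorem pyZipStar_getElem? (i : Nat) : ∀ (rows : List (List Int)),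
    rows ≠ [] → (∀ r ∈ rows, i < r.length) →
    (pyZipStar rows)[i]? = some (rows.map (fun r => r.getD i 0)) := by
  induction i with
  | zero =>
    intro rows hne hlen
    match rows with
    | r :: rs =>
      have hcond : r ≠ [] ∧ rs.all (fun t => !t.isEmpty) = true := by
        constructor
        · intro h; have := hlen r (by simp); simp [h] at this
        · simp only [List.all_eq_true]
          intro t ht
          have := hlen t (by simp [ht])
          simp; intro h; simp [h] at this
      rw [pyZipStar]
      simp only [hcond, and_true, ne_eq, not_false_eq_true, dite_true,
        List.getElem?_cons_zero, List.map_cons, Option.some.injEq, List.cons.injEq]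
      exact ⟨headD_eq_getD_zero r, List.map_congr_left (fun t _ => headD_eq_getD_zero t)⟩
  | succ n ih =>
    intro rows hne hlen
    match rows with
    | r :: rs =>
      have hcond : r ≠ [] ∧ rs.all (fun t => !t.isEmpty) = true := by
        constructor
        · intro h; have := hlen r (by simp); simp [h] at this
        · simp only [List.all_eq_true]
          intro t ht
          have := hlen t (by simp [ht])
          simp; intro h; simp [h] at this
      rw [pyZipStar]
      simp only [hcond, and_true, ne_eq, not_false_eq_true, dite_true,
        List.getElem?_cons_succ]
      rw [ih (r.tail :: rs.map (fun t => t.tail)) (by simp)]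
      · simp only [List.map_cons, List.map_map, Option.some.injEq, List.cons.injEq]
        refine ⟨tail_getD r n (hlen r (by simp)), List.map_congr_left (fun t ht => ?_)⟩
        exact tail_getD t n (hlen t (by simp [ht]))
      · intro t ht
        simp at ht
        rcases ht with h | ⟨u, hu, rfl⟩
        · subst h
          have := hlen r (by simp)
          cases r with
          | nil => simp at this
          | cons a w => simpa using this
        · have := hlen u (by simp [hu])
          cases u with
          | nil => simp at this
          | cons a w => simpa using this

theorem bIntAt_eq (line : String) (i : Nat) (h : i < (PySem.Str.split₀ line).length) :
    bIntAt line (i : Int) = (prow line).getD i 0 := by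
  simp [bIntAt, prow, PySem.List.pyGet?_natCast, List.getD, List.getElem?_eq_getElem h,
    List.getElem?_map]

theorem bStep_length (ops : List String) (accs : List Int) (line : String) :
    (bStep ops accs line).length = min ops.length accs.length := by
  simp [bStep, PySem.List.length_enumerate]

theorem bStep_getD (ops : List String) (accs : List Int) (line : String)
    (hlen : accs.length = ops.length) (i : Nat) (hi : i < ops.length) :
    (bStep ops accs line).getD i 0 =
      (if ops[i] = "*" then accs.getD i 0 * bIntAt line (i : Int)
       else if ops[i] = "+" then accs.getD i 0 + bIntAt line (i : Int)
       else accs.getD i 0) := by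
  have hiz : i < (ops.zip accs).length := by rw [List.length_zip]; omega
  have ha : i < accs.length := by omega
  have hie : i < (PySem.List.enumerate (ops.zip accs) 0).length := by
    rw [PySem.List.length_enumerate]; exact hiz
  rw [List.getD, bStep, List.getElem?_map, List.getElem?_eq_getElem hie]
  simp [PySem.List.getElem_enumerate, List.getElem_zip, List.getD, ha]

theorem foldl_bStep_length (ops : List String) (lines' : List String) :
    ∀ (accs : List Int), accs.length = ops.length →
    (lines'.foldl (bStep ops) accs).length = ops.length := by
  induction lines' with
  | nil => intro accs h; simpa using h
  | cons l t ih =>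
    intro accs h
    rw [List.foldl_cons]
    exact ih _ (by rw [bStep_length]; omega)

theorem foldl_bStep_getD (ops : List String) (i : Nat) (hi : i < ops.length) :
    ∀ (lines' : List String) (accs : List Int), accs.length = ops.length →
    (lines'.foldl (bStep ops) accs).getD i 0 =
      lines'.foldl (fun a line =>
        if ops[i] = "*" then a * bIntAt line (i : Int)
        else if ops[i] = "+" then a + bIntAt line (i : Int)
        else a) (accs.getD i 0) := by
  intro lines'
  induction lines' with
  | nil => intro accs _; rfl
  | cons l t ih =>
    intro accs h
    rw [List.foldl_cons, List.foldl_cons, ih _ (by rw [bStep_length]; omega),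
      bStep_getD ops accs l h i hi]

theorem foldl_mul_int (l : List Int) (a : Int) :
    l.foldl (fun acc x => acc * x) a = a * l.prod := by
  induction l generalizing a with
  | nil => simp
  | cons x t ih => simp [ih, mul_assoc]

theorem foldl_mul_map_int (l : List String) (g : String → Int) (a : Int) :
    l.foldl (fun acc x => acc * g x) a = a * (l.map g).prod := by
  induction l generalizing a with
  | nil => simp
  | cons x t ih => simp [ih, mul_assoc]

theorem sum_flatMap_int {α : Type} (l : List α) (g : α → List Int) :
    (l.flatMap g).sum = (l.map (fun x => (g x).sum)).sum := by
  induction l with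
  | nil => simp
  | cons x t ih => simp [List.flatMap_cons, ih]

-- ===== VERDICT (by name: the statement is the Claim_ definition above) =====
set_option maxHeartbeats 1000000 in
theorem part_one_spec : Claim_equal_part_one := by
  intro data _ hpre
  unfold Spec_part_one
  simp only [Pre_part_one] at hpre
  obtain ⟨hne, -, hop⟩ := hpre
  unfold part_one part_one_alt parsed_data
  dsimp only
  rw [slice_len_sub_one, PySem.List.slice_to_neg_one]
  set lines := PySem.Str.splitlines data with hl
  set ops := PySem.Str.split₀ ((PySem.List.pyGet? lines (-1)).getD "") with hops
  set rows' := lines.dropLast with hrows'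
  -- the per-operator facts from Pre_ (stated over getLast?) transfer to ops
  have hopeq : PySem.Str.split₀ (lines.getLast?.getD "") = ops := by
    rw [hops, PySem.List.pyGet?_neg_one]
  rw [hopeq] at hop
  set accs0 : List Int := ops.map (fun op => if op = "*" then (1 : Int) else 0) with haccs0
  have hlen0 : accs0.length = ops.length := by simp [haccs0]
  set accsF := rows'.foldl (bStep ops) accs0 with haccsF
  have hlenF : accsF.length = ops.length := foldl_bStep_length ops rows' accs0 hlen0
  set rows : List (List Int) :=
    rows'.map (fun temp => (PySem.Str.split₀ temp).map (fun s => (PySem.Int.ofStr? s).getD 0)) with hrows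
  have hrowsp : rows = rows'.map prow := rfl
  clear_value rows accsF accs0 rows' ops lines
  -- LHS: the answers loop as a flatMap, then a sum of per-operator contributions
  rw [show (fun (answers : List Int) (iops : Int × String) =>
        if iops.2 = "*" then answers ++ [pyProdInt ((PySem.List.pyGet? (pyZipStar rows) iops.1).getD [])]
        else if iops.2 = "+" then answers ++ [((PySem.List.pyGet? (pyZipStar rows) iops.1).getD []).sum]
        else answers)
      = (fun answers iops => answers ++
          (if iops.2 = "*" then [pyProdInt ((PySem.List.pyGet? (pyZipStar rows) iops.1).getD [])]
           else if iops.2 = "+" then [((PySem.List.pyGet? (pyZipStar rows) iops.1).getD []).sum]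
           else [])) from by funext answers iops; split_ifs <;> simp]
  rw [PySem.List.foldl_append_eq_flatMap, List.nil_append, sum_flatMap_int]
  -- RHS: the final comprehension sum as a sum over zip
  rw [show (fun (s : Int) (p : String × Int) => if p.1 = "*" ∨ p.1 = "+" then s + p.2 else s)
      = (fun s p => s + (if p.1 = "*" ∨ p.1 = "+" then p.2 else 0)) from by
        funext s p; split_ifs <;> simp]
  rw [PySem.List.foldl_add, zero_add]
  -- the two mapped lists are equal element by element
  congr 1
  apply List.ext_getElem
  · rw [List.length_map, PySem.List.length_enumerate, List.length_map, List.length_zip, hlenF,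
      Nat.min_self]
  intro i h1 h2
  rw [List.length_map, PySem.List.length_enumerate] at h1
  simp only [List.getElem_map, PySem.List.getElem_enumerate, List.getElem_zip, zero_add]
  have hib : i < accsF.length := by omega
  have haccget : accsF[i] = accsF.getD i 0 := (List.getD_eq_getElem accsF 0 hib).symm
  by_cases hstar : ops[i] = "*"
  case pos =>
    -- Pre_ gives valid columns for this operator
    obtain ⟨hrne, hcols⟩ := hop ((0 : Int) + (i : Int), ops[i])
      (by rw [PySem.List.mem_enumerate_iff]; exact ⟨i, h1, rfl⟩) (Or.inl hstar)
    have hcols' : ∀ line ∈ rows', i < (PySem.Str.split₀ line).length := by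
      intro line hline
      have := hcols line hline
      simp only [zero_add] at this
      exact_mod_cast this
    have hzr : (pyZipStar rows)[i]? = some (rows.map (fun r => r.getD i 0)) := by
      apply pyZipStar_getElem? i rows (by simp [hrowsp, hrne])
      intro r hr
      rw [hrowsp] at hr
      obtain ⟨line, hline, rfl⟩ := List.mem_map.mp hr
      simpa [prow] using hcols' line hline
    have hfold := foldl_bStep_getD ops i h1 rows' accs0 hlen0
    rw [← haccsF] at hfold
    rw [haccget, hfold]
    simp only [PySem.List.pyGet?_natCast, hzr, Option.getD_some, hstar, reduceIte]
    have hinit : accs0.getD i 0 = 1 := by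
      rw [haccs0, List.getD, List.getElem?_map, List.getElem?_eq_getElem h1]
      simp [hstar]
    rw [hinit, pyProdInt, foldl_mul_int,
      foldl_mul_map_int rows' (fun l => bIntAt l (i : Int)) 1]
    rw [hrowsp, List.map_map]
    simp only [true_or, if_true, List.sum_singleton]
    congr 2
    apply List.map_congr_left
    intro line hline
    exact (bIntAt_eq line i (hcols' line hline)).symm
  case neg =>
    rcases eq_or_ne ops[i] "+" with hplus | hplus
    case inl =>
      obtain ⟨hrne, hcols⟩ := hop ((0 : Int) + (i : Int), ops[i])
        (by rw [PySem.List.mem_enumerate_iff]; exact ⟨i, h1, rfl⟩) (Or.inr hplus)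
      have hcols' : ∀ line ∈ rows', i < (PySem.Str.split₀ line).length := by
        intro line hline
        have := hcols line hline
        simp only [zero_add] at this
        exact_mod_cast this
      have hzr : (pyZipStar rows)[i]? = some (rows.map (fun r => r.getD i 0)) := by
        apply pyZipStar_getElem? i rows (by simp [hrowsp, hrne])
        intro r hr
        rw [hrowsp] at hr
        obtain ⟨line, hline, rfl⟩ := List.mem_map.mp hr
        simpa [prow] using hcols' line hline
      have hfold := foldl_bStep_getD ops i h1 rows' accs0 hlen0
      rw [← haccsF] at hfold
      rw [haccget, hfold]
      simp only [zero_add, PySem.List.pyGet?_natCast, hzr, Option.getD_some, hstar,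
        hplus, if_pos rfl, if_pos (Or.inr rfl), String.reduceEq, reduceIte]
      have hinit : accs0.getD i 0 = 0 := by
        rw [haccs0, List.getD, List.getElem?_map, List.getElem?_eq_getElem h1]
        simp [hstar]
      rw [hinit, PySem.List.foldl_add (g := fun l => bIntAt l (i : Int)), zero_add]
      rw [hrowsp, List.map_map]
      simp only [or_true, if_true, List.sum_singleton]
      congr 1
      apply List.map_congr_left
      intro line hline
      exact (bIntAt_eq line i (hcols' line hline)).symm
    case inr =>
      simp [hstar, hplus]
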